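-- pv_equiv track=rewrite | github.com/ajmaq0/Clearinghouse | backend/app/api/network.py | _count_new_cycles
-- ===== SOURCE A (Python) =====
-- from collections import defaultdict
--
-- def _count_new_cycles(base_flow: dict, extra_flow: dict) -> int:
--     """
--     Count how many additional directed cycles (length ≥ 3) become reachable
--     when extra_flow edges are added to base_flow.  Uses simple DFS cycle detection.
--     Only counts cycles that include at least one candidate node.
--     """
--     combined = defaultdict(set)
--     for src, targets in base_flow.items():
--         for tgt in targets:
--             combined[src].add(tgt)
--     candidate_nodes = set()
--     for src, targets in extra_flow.items():
--         for tgt in targets: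
--             combined[src].add(tgt)
--             candidate_nodes.add(src)
--             candidate_nodes.add(tgt)
--
--     # For each candidate node, count simple cycles through it (capped at 20)
--     cycles_found = 0
--     for start in candidate_nodes:
--         stack = [(start, [start], {start})]
--         while stack and cycles_found < 20:
--             node, path, visited = stack.pop()
--             for nb in combined.get(node, []):
--                 if nb == start and len(path) >= 3:
--                     cycles_found += 1
--                 elif nb not in visited and len(path) < 6:
--                     stack.append((nb, path + [nb], visited | {nb}))
--     return min(cycles_found, 20)
-- ===== SOURCE B (Python) =====
-- def _count_new_cycles(base_flow: dict, extra_flow: dict) -> int: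
--     combined = {}
--     for src, targets in base_flow.items():
--         for tgt in targets:
--             combined.setdefault(src, set()).add(tgt)
--     candidate_nodes = set()
--     for src, targets in extra_flow.items():
--         for tgt in targets:
--             combined.setdefault(src, set()).add(tgt)
--             candidate_nodes.add(src)
--             candidate_nodes.add(tgt)
--
--     def dfs(start, node, path, visited, found):
--         for nb in combined.get(node, ()):
--             if found >= 20:
--                 return found
--             if nb == start and len(path) >= 3:
--                 found += 1
--             elif nb not in visited and len(path) < 6:
--                 found = dfs(start, nb, path + [nb], visited | {nb}, found)
--         return found
--
--     found = 0
--     for start in candidate_nodes: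
--         if found >= 20:
--             break
--         found = dfs(start, start, [start], {start}, found)
--     return min(found, 20)
-- ===== Notes on version B (the rewrite author's own statement) =====
-- stated objective: alternative
-- what changed: Replaces A's explicit-stack DFS loop (frames of (node, path, visited) popped while cycles_found < 20) with a recursive dfs helper over combined.get(node, ()) that threads the found-count and checks the 20-cap before every neighbour; graph building is unchanged.
import Mathlib
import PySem

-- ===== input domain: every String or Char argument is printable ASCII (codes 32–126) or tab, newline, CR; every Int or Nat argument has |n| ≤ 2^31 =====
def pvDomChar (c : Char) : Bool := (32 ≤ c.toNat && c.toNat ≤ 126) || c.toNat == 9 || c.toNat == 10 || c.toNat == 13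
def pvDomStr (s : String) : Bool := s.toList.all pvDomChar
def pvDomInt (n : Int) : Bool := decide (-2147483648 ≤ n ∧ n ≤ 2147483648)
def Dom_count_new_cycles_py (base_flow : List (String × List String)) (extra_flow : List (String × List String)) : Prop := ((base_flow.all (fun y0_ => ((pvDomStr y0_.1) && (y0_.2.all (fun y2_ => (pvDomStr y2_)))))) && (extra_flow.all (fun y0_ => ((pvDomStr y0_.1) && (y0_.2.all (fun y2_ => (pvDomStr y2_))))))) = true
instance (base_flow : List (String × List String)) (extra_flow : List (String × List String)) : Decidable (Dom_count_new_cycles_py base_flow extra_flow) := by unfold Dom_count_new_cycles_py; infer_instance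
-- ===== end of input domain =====

-- B rewrites A's explicit-stack DFS as a recursive dfs helper threading the found-count with a
-- per-neighbour cap check (same graph building, different traversal decomposition); objective: alternative.

-- ===== PORT A =====
-- Shared graph building (identical Python code in A and in B): combined = defaultdict(set) fed by
-- base_flow then extra_flow, collecting candidate_nodes from extra_flow along the way.
def cncBuild (base_flow : List (String × List String)) (extra_flow : List (String × List String)) :
    PySem.Dict String (PySem.Set String) × PySem.Set String :=
  let c1 := (PySem.Dict.ofList base_flow).items.foldl
    (fun d p => p.2.foldl (fun d tgt =>
        PySem.Dict.insert d p.1 (PySem.Set.add (PySem.Dict.getD d p.1 PySem.Set.empty) tgt)) d)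
    PySem.Dict.empty
  (PySem.Dict.ofList extra_flow).items.foldl
    (fun st p => p.2.foldl (fun st tgt =>
        (PySem.Dict.insert st.1 p.1 (PySem.Set.add (PySem.Dict.getD st.1 p.1 PySem.Set.empty) tgt),
         PySem.Set.add (PySem.Set.add st.2 p.1) tgt)) st)
    (c1, PySem.Set.empty)

-- per-frame work of A's while-loop body: number of 'nb == start and len(path) >= 3' hits …
def cncHits (c : PySem.Dict String (PySem.Set String)) (start node : String) (path : List String) : Int :=
  ((PySem.Dict.getD c node []).filter (fun nb => nb == start && decide (3 ≤ path.length))).length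

-- … and the frames pushed by the elif branch (in push order; the stack pops them last-first).
def cncChildren (c : PySem.Dict String (PySem.Set String)) (start node : String)
    (path : List String) (vis : PySem.Set String) : List (String × List String × PySem.Set String) :=
  ((PySem.Dict.getD c node []).filter (fun nb =>
      !(nb == start && decide (3 ≤ path.length)) && !(PySem.Set.contains vis nb) && decide (path.length < 6))).map
    (fun nb => (nb, path ++ [nb], PySem.Set.add vis nb))

-- termination measure for the stack loop
def cncDeg (c : PySem.Dict String (PySem.Set String)) : Nat := (c.items.map (fun p => p.2.length)).sum

def cncM (c : PySem.Dict String (PySem.Set String)) (f : String × List String × PySem.Set String) : Nat :=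
  (cncDeg c + 1) ^ (7 - min f.2.1.length 7)

def cncMS (c : PySem.Dict String (PySem.Set String)) (s : List (String × List String × PySem.Set String)) : Nat :=
  (s.map (cncM c)).sum

lemma cnc_getD_len_le (c : PySem.Dict String (PySem.Set String)) (k : String) :
    (PySem.Dict.getD c k []).length ≤ cncDeg c := by
  rw [PySem.Dict.getD_eq_get?_getD]
  cases h : PySem.Dict.get? c k with
  | none => simp [cncDeg]
  | some v =>
      have hm : (k, v) ∈ c.items := PySem.Dict.mem_items_of_get?_eq_some c h
      have : v.length ∈ c.items.map (fun p => p.2.length) := List.mem_map.2 ⟨(k, v), hm, rfl⟩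
      exact List.single_le_sum (by simp) _ this

-- the stack shrinks in measure at every pop (cited by cncLoopA's decreasing_by)
lemma cnc_dec (c : PySem.Dict String (PySem.Set String)) (start node : String)
    (path : List String) (vis : PySem.Set String) (rest : List (String × List String × PySem.Set String)) :
    cncMS c ((cncChildren c start node path vis).reverse ++ rest) < cncMS c ((node, path, vis) :: rest) := by
  have hsplit : cncMS c ((cncChildren c start node path vis).reverse ++ rest)
      = ((cncChildren c start node path vis).map (cncM c)).sum + cncMS c rest := by
    simp [cncMS, List.map_reverse, List.sum_reverse]
  rw [hsplit]
  have hhead : cncMS c ((node, path, vis) :: rest) = cncM c (node, path, vis) + cncMS c rest := by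
    simp [cncMS]
  rw [hhead]
  have hlt : ((cncChildren c start node path vis).map (cncM c)).sum < cncM c (node, path, vis) := by
    by_cases hL : path.length < 6
    · have hmap : (cncChildren c start node path vis).map (cncM c)
          = ((PySem.Dict.getD c node []).filter (fun nb =>
              !(nb == start && decide (3 ≤ path.length)) && !(PySem.Set.contains vis nb) && decide (path.length < 6))).map
            (fun _ => (cncDeg c + 1) ^ (6 - path.length)) := by
        simp only [cncChildren, List.map_map]
        refine List.map_congr_left (fun nb _ => ?_)
        simp only [Function.comp, cncM]
        have : min (path.length + 1) 7 = path.length + 1 := by omega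
        simp [this]
      rw [hmap]
      have hlen : ((PySem.Dict.getD c node []).filter (fun nb =>
              !(nb == start && decide (3 ≤ path.length)) && !(PySem.Set.contains vis nb) && decide (path.length < 6))).length
            ≤ cncDeg c :=
        le_trans (List.length_filter_le _ _) (cnc_getD_len_le c node)
      calc (((PySem.Dict.getD c node []).filter _).map (fun _ => (cncDeg c + 1) ^ (6 - path.length))).sum
          = ((PySem.Dict.getD c node []).filter _).length * (cncDeg c + 1) ^ (6 - path.length) := by
            rw [List.map_const']; simp [List.sum_replicate, smul_eq_mul]
        _ ≤ cncDeg c * (cncDeg c + 1) ^ (6 - path.length) := Nat.mul_le_mul_right _ hlen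
        _ < (cncDeg c + 1) * (cncDeg c + 1) ^ (6 - path.length) := by
            exact (Nat.mul_lt_mul_right (pow_pos (Nat.succ_pos _) _)).2 (Nat.lt_succ_self _)
        _ = cncM c (node, path, vis) := by
            have : min path.length 7 = path.length := by omega
            rw [cncM]; simp only [this]
            rw [← pow_succ']
            congr 1
            omega
    · have hnil : cncChildren c start node path vis = [] := by
        simp only [cncChildren, List.map_eq_nil_iff]
        refine List.filter_eq_nil_iff.2 (fun a _ => ?_)
        simp [hL]
      rw [hnil]
      simp [cncM]
  omega

-- A's inner 'while stack and cycles_found < 20' loop (stack top = list head)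
def cncLoopA (c : PySem.Dict String (PySem.Set String)) (start : String)
    (stack : List (String × List String × PySem.Set String)) (cf : Int) : Int :=
  match stack with
  | [] => cf
  | (node, path, vis) :: rest =>
      if cf < 20 then
        cncLoopA c start ((cncChildren c start node path vis).reverse ++ rest)
          (cf + cncHits c start node path)
      else cf
termination_by cncMS c stack
decreasing_by simpa using cnc_dec c start node path vis rest

def count_new_cycles_py (base_flow : List (String × List String)) (extra_flow : List (String × List String)) : Int :=
  let combined := (cncBuild base_flow extra_flow).1
  let candidate_nodes := (cncBuild base_flow extra_flow).2
  let cycles_found := candidate_nodes.foldl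
    (fun cf start => cncLoopA combined start [(start, [start], PySem.Set.ofList [start])] cf) 0
  min cycles_found 20

-- ===== PORT B =====
-- B's recursive dfs(start, node, path, visited, found): cap checked before every neighbour,
-- hit / recurse / skip per neighbour, threading the updated found through the loop.
def cncDfsB (c : PySem.Dict String (PySem.Set String)) (start node : String)
    (path : List String) (vis : PySem.Set String) (found : Int) : Int :=
  (PySem.Dict.getD c node []).foldl (fun found nb =>
      if 20 ≤ found then found
      else if nb == start && decide (3 ≤ path.length) then found + 1
      else if !(PySem.Set.contains vis nb) && decide (path.length < 6) then
        cncDfsB c start nb (path ++ [nb]) (PySem.Set.add vis nb) found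
      else found) found
termination_by 6 - path.length
decreasing_by simp_all; omega

def count_new_cycles_py_alt (base_flow : List (String × List String)) (extra_flow : List (String × List String)) : Int :=
  let combined := (cncBuild base_flow extra_flow).1
  let candidate_nodes := (cncBuild base_flow extra_flow).2
  let found := candidate_nodes.foldl
    (fun found start =>
      if 20 ≤ found then found
      else cncDfsB combined start start [start] (PySem.Set.ofList [start]) found) 0
  min found 20

-- ===== PRECONDITION & SPEC =====
def Spec_count_new_cycles_py (base_flow : List (String × List String)) (extra_flow : List (String × List String)) (out : Int) : Prop := out = count_new_cycles_py_alt base_flow extra_flow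
instance (base_flow : List (String × List String)) (extra_flow : List (String × List String)) (out : Int) : Decidable (Spec_count_new_cycles_py base_flow extra_flow out) := by unfold Spec_count_new_cycles_py; infer_instance

-- ===== CLAIM (what is proved, stated in full; the proofs are below) =====
def Claim_equal_count_new_cycles_py : Prop := ∀ (base_flow : List (String × List String)) (extra_flow : List (String × List String)), Dom_count_new_cycles_py base_flow extra_flow → Spec_count_new_cycles_py base_flow extra_flow (count_new_cycles_py base_flow extra_flow)

-- ===== LEMMAS AND PROOFS =====

-- T = uncapped number of cycle completions found by a DFS from this frame (proof-only yardstick)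
def cncT (c : PySem.Dict String (PySem.Set String)) (start node : String)
    (path : List String) (vis : PySem.Set String) : Int :=
  (PySem.Dict.getD c node []).foldl (fun acc nb =>
      if nb == start && decide (3 ≤ path.length) then acc + 1
      else if !(PySem.Set.contains vis nb) && decide (path.length < 6) then
        acc + cncT c start nb (path ++ [nb]) (PySem.Set.add vis nb)
      else acc) 0
termination_by 6 - path.length
decreasing_by simp_all; omega

def cncG (c : PySem.Dict String (PySem.Set String)) (start : String)
    (path : List String) (vis : PySem.Set String) (nb : String) : Int :=
  if nb == start && decide (3 ≤ path.length) then 1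
  else if !(PySem.Set.contains vis nb) && decide (path.length < 6) then
    cncT c start nb (path ++ [nb]) (PySem.Set.add vis nb)
  else 0

theorem cncT_eq_sum (c : PySem.Dict String (PySem.Set String)) (start node : String)
    (path : List String) (vis : PySem.Set String) :
    cncT c start node path vis = ((PySem.Dict.getD c node []).map (cncG c start path vis)).sum := by
  rw [cncT]
  have aux : ∀ (l : List String) (a : Int),
      l.foldl (fun acc nb =>
        if nb == start && decide (3 ≤ path.length) then acc + 1
        else if !(PySem.Set.contains vis nb) && decide (path.length < 6) then
          acc + cncT c start nb (path ++ [nb]) (PySem.Set.add vis nb)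
        else acc) a = a + (l.map (cncG c start path vis)).sum := by
    intro l
    induction l with
    | nil => simp
    | cons nb l ihl =>
      intro a
      simp only [List.foldl_cons, List.map_cons, List.sum_cons, ihl, cncG]
      split_ifs <;> omega
  simpa using aux _ 0

theorem cncT_nonneg' (c : PySem.Dict String (PySem.Set String)) (start : String) :
    ∀ (k : Nat) (node : String) (path : List String) (vis : PySem.Set String),
    6 - path.length ≤ k → 0 ≤ cncT c start node path vis := by
  intro k
  induction k using Nat.strong_induction_on with
  | _ k IH =>
    intro node path vis hk
    rw [cncT_eq_sum]
    apply List.sum_nonneg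
    intro x hx
    obtain ⟨nb, _, rfl⟩ := List.mem_map.1 hx
    unfold cncG
    split_ifs with h1 h2
    · omega
    · have hlt : path.length < 6 := by simp at h2; exact h2.2
      apply IH (k - 1) (by omega)
      simp; omega
    · omega

theorem cncG_sum_split (c : PySem.Dict String (PySem.Set String)) (start : String)
    (path : List String) (vis : PySem.Set String) :
    ∀ (l : List String),
    (l.map (cncG c start path vis)).sum
      = ((l.filter (fun nb => nb == start && decide (3 ≤ path.length))).length : Int)
        + ((l.filter (fun nb =>
            !(nb == start && decide (3 ≤ path.length)) && !(PySem.Set.contains vis nb) && decide (path.length < 6))).map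
            (fun nb => cncT c start nb (path ++ [nb]) (PySem.Set.add vis nb))).sum := by
  intro l
  induction l with
  | nil => simp
  | cons nb l ihl =>
    simp only [List.map_cons, List.sum_cons, List.filter_cons, ihl, cncG]
    cases hb1 : (nb == start && decide (3 ≤ path.length)) <;>
      cases hb2 : (!(PySem.Set.contains vis nb) && decide (path.length < 6)) <;>
        simp only [hb1, hb2, Bool.not_true, Bool.not_false, Bool.false_and, Bool.true_and,
          if_true, if_false, List.map_cons, List.sum_cons, List.length_cons] <;>
        push_cast <;> omega

theorem cnc_min_shift (x y S : Int) (hS : 0 ≤ S) (h : min x 20 = min y 20) :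
    min (x + S) 20 = min (y + S) 20 := by
  simp only [min_def] at h ⊢
  split_ifs at h ⊢ <;> omega

theorem cncDfsB_min (c : PySem.Dict String (PySem.Set String)) (start : String) :
    ∀ (k : Nat) (node : String) (path : List String) (vis : PySem.Set String),
      6 - path.length ≤ k → ∀ f : Int,
      min (cncDfsB c start node path vis f) 20 = min (f + cncT c start node path vis) 20 := by
  intro k
  induction k using Nat.strong_induction_on with
  | _ k IH =>
    intro node path vis hk
    have aux : ∀ (l : List String) (f : Int),
        min (l.foldl (fun found nb =>
          if 20 ≤ found then found
          else if nb == start && decide (3 ≤ path.length) then found + 1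
          else if !(PySem.Set.contains vis nb) && decide (path.length < 6) then
            cncDfsB c start nb (path ++ [nb]) (PySem.Set.add vis nb) found
          else found) f) 20
        = min (f + (l.map (cncG c start path vis)).sum) 20 := by
      intro l
      induction l with
      | nil => simp
      | cons nb l ihl =>
        intro f
        have hSnn : 0 ≤ (l.map (cncG c start path vis)).sum := by
          apply List.sum_nonneg
          intro x hx
          obtain ⟨nb', _, rfl⟩ := List.mem_map.1 hx
          unfold cncG
          split_ifs with h1 h2
          · omega
          · have hlt : path.length < 6 := by simp at h2; exact h2.2
            apply cncT_nonneg' c start 6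
            simp only [List.length_append, List.length_cons, List.length_nil]
            omega
          · omega
        simp only [List.foldl_cons, List.map_cons, List.sum_cons, ihl]
        by_cases hf : 20 ≤ f
        · have hgnn : 0 ≤ cncG c start path vis nb := by
            unfold cncG
            split_ifs with h1 h2
            · omega
            · have hlt : path.length < 6 := by simp at h2; exact h2.2
              apply cncT_nonneg' c start 6
              simp only [List.length_append, List.length_cons, List.length_nil]
              omega
            · omega
          rw [if_pos hf, min_eq_right (by omega), min_eq_right (by omega)]
        · rw [if_neg hf]
          by_cases h1 : (nb == start && decide (3 ≤ path.length)) = true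
          · rw [if_pos h1]
            have hg : cncG c start path vis nb = 1 := by unfold cncG; rw [if_pos h1]
            rw [hg, show f + (1 + (List.map (cncG c start path vis) l).sum)
              = f + 1 + (List.map (cncG c start path vis) l).sum by ring]
          · rw [if_neg h1]
            by_cases h2 : (!(PySem.Set.contains vis nb) && decide (path.length < 6)) = true
            · rw [if_pos h2]
              have hlt : path.length < 6 := by simp at h2; exact h2.2
              have hrec := IH (k - 1) (by omega) nb (path ++ [nb]) (PySem.Set.add vis nb)
                (by simp only [List.length_append, List.length_cons, List.length_nil]; omega) f
              have hg : cncG c start path vis nb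
                  = cncT c start nb (path ++ [nb]) (PySem.Set.add vis nb) := by
                unfold cncG; rw [if_neg h1, if_pos h2]
              rw [hg, show f + (cncT c start nb (path ++ [nb]) (PySem.Set.add vis nb)
                  + (List.map (cncG c start path vis) l).sum)
                = (f + cncT c start nb (path ++ [nb]) (PySem.Set.add vis nb))
                  + (List.map (cncG c start path vis) l).sum by ring]
              exact cnc_min_shift _ _ _ hSnn hrec
            · rw [if_neg h2]
              have hg : cncG c start path vis nb = 0 := by
                unfold cncG; rw [if_neg h1, if_neg h2]
              rw [hg, zero_add]
    intro f
    rw [cncDfsB, cncT_eq_sum]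
    exact aux _ f

def cncTS (c : PySem.Dict String (PySem.Set String)) (start : String)
    (s : List (String × List String × PySem.Set String)) : Int :=
  (s.map (fun f => cncT c start f.1 f.2.1 f.2.2)).sum

theorem cncTS_nonneg (c : PySem.Dict String (PySem.Set String)) (start : String)
    (s : List (String × List String × PySem.Set String)) : 0 ≤ cncTS c start s := by
  apply List.sum_nonneg
  intro x hx
  obtain ⟨f, _, rfl⟩ := List.mem_map.1 hx
  exact cncT_nonneg' c start 6 _ _ _ (by omega)

theorem cncT_decomp (c : PySem.Dict String (PySem.Set String)) (start node : String)
    (path : List String) (vis : PySem.Set String) :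
    cncT c start node path vis
      = cncHits c start node path + cncTS c start (cncChildren c start node path vis) := by
  rw [cncT_eq_sum, cncG_sum_split]
  congr 1
  simp [cncTS, cncChildren, List.map_map, Function.comp_def]

theorem cncLoopA_min (c : PySem.Dict String (PySem.Set String)) (start : String) :
    ∀ (stack : List (String × List String × PySem.Set String)) (cf : Int),
      min (cncLoopA c start stack cf) 20 = min (cf + cncTS c start stack) 20 := by
  intro stack cf
  induction stack, cf using cncLoopA.induct c start with
  | case1 cf => simp [cncLoopA, cncTS]
  | case2 cf node path vis rest h ih =>
      rw [cncLoopA]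
      simp only [if_pos h]
      rw [ih]
      have hsplit : cncTS c start ((cncChildren c start node path vis).reverse ++ rest)
          = cncTS c start (cncChildren c start node path vis) + cncTS c start rest := by
        simp [cncTS, List.map_reverse, List.sum_reverse]
      have hcons : cncTS c start ((node, path, vis) :: rest)
          = cncT c start node path vis + cncTS c start rest := by
        simp [cncTS]
      rw [hsplit, hcons, cncT_decomp]
      congr 1
      ring
  | case3 cf node path vis rest h =>
      rw [cncLoopA]
      simp only [if_neg h]
      have hTS := cncTS_nonneg c start ((node, path, vis) :: rest)
      rw [min_eq_right (by omega), min_eq_right (by omega)]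

theorem cnc_outer (c : PySem.Dict String (PySem.Set String)) :
    ∀ (l : List String) (a b : Int), min a 20 = min b 20 →
      min (l.foldl (fun cf start => cncLoopA c start [(start, [start], PySem.Set.ofList [start])] cf) a) 20
        = min (l.foldl (fun found start =>
            if 20 ≤ found then found
            else cncDfsB c start start [start] (PySem.Set.ofList [start]) found) b) 20 := by
  intro l
  induction l with
  | nil => intro a b h; simpa using h
  | cons s0 l ih =>
      intro a b h
      simp only [List.foldl_cons]
      apply ih
      have hT : 0 ≤ cncT c s0 s0 [s0] (PySem.Set.ofList [s0]) :=
        cncT_nonneg' c s0 6 _ _ _ (by omega)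
      have hA : min (cncLoopA c s0 [(s0, [s0], PySem.Set.ofList [s0])] a) 20
          = min (a + cncT c s0 s0 [s0] (PySem.Set.ofList [s0])) 20 := by
        have := cncLoopA_min c s0 [(s0, [s0], PySem.Set.ofList [s0])] a
        simpa [cncTS] using this
      by_cases hb : 20 ≤ b
      · have ha : 20 ≤ a := by
          simp only [min_def] at h; split_ifs at h <;> omega
        rw [if_pos hb, hA, min_eq_right (by omega), min_eq_right (by omega)]
      · have hab : a = b := by
          simp only [min_def] at h; split_ifs at h <;> omega
        subst hab
        rw [if_neg hb, hA,
          cncDfsB_min c s0 6 s0 [s0] (PySem.Set.ofList [s0]) (by simp) a]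


-- ===== VERDICT (by name: the statement is the Claim_ definition above) =====
theorem count_new_cycles_py_spec : Claim_equal_count_new_cycles_py := by
  intro base_flow extra_flow _
  unfold Spec_count_new_cycles_py count_new_cycles_py count_new_cycles_py_alt
  exact cnc_outer _ _ 0 0 rfl
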